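-- pv_equiv track=rewrite | github.com/SiddharthShah30/puzzle-solver | sudoku_solver/ui.py | _is_valid_region_map
-- ===== SOURCE A (Python) =====
-- from typing import List, Optional, Tuple, Set
--
-- def _is_valid_region_map(region_map: List[List[int]], size: int) -> bool:
--     if len(region_map) != size or any(len(row) != size for row in region_map):
--         return False
--
--     region_counts = {}
--     for row in region_map:
--         for region_id in row:
--             region_counts[region_id] = region_counts.get(region_id, 0) + 1
--
--     return len(region_counts) == size and all(count == size for count in region_counts.values())
-- ===== SOURCE B (Python) =====
-- from itertools import groupby
-- from typing import List
--
-- def _is_valid_region_map(region_map: List[List[int]], size: int) -> bool: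
--     if len(region_map) != size or any(len(row) != size for row in region_map):
--         return False
--
--     cells = sorted(rid for row in region_map for rid in row)
--     group_lens = [len(list(g)) for _, g in groupby(cells)]
--     return len(group_lens) == size and all(n == size for n in group_lens)
-- ===== Notes on version B (the rewrite author's own statement) =====
-- stated objective: alternative
-- what changed: The hash-map occurrence count is replaced by flatten-sort-then-scan: the cells are sorted and itertools.groupby splits them into runs of equal region ids, validity being 'size runs, each of length size'.
import Mathlib
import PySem

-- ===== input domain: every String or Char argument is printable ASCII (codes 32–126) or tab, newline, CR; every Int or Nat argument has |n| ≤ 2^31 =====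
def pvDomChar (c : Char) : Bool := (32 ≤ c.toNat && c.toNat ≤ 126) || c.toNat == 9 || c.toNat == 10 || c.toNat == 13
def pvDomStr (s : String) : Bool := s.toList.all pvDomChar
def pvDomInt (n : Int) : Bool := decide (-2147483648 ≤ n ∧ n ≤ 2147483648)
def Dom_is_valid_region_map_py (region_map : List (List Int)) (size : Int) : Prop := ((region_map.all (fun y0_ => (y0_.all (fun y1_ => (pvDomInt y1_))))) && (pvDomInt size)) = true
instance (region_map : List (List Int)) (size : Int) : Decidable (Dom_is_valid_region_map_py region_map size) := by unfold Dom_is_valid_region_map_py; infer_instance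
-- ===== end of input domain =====

-- B replaces A's hash-map occurrence count by a flatten-sort-then-scan-runs pass (alternative algorithm, same result).


-- ===== PORT A =====
def is_valid_region_map_py (region_map : List (List Int)) (size : Int) : Bool :=
  if ((region_map.length : Int) != size) || region_map.any (fun row => (row.length : Int) != size) then
    false
  else
    -- region_counts[region_id] = region_counts.get(region_id, 0) + 1, over rows then cells
    let counts := region_map.foldl
      (fun d row => row.foldl (fun d x => d.insert x (d.getD x 0 + 1)) d)
      (PySem.Dict.empty : PySem.Dict Int Int)
    ((counts.size : Int) == size) && counts.values.all (fun c => c == size)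

-- ===== PORT B =====
-- len(list(g)) for each groupby run: scan the sorted list, counting maximal runs of equal values
def pvRunLens : Int → Nat → List Int → List Nat
  | _, n, [] => [n]
  | cur, n, y :: ys => if y = cur then pvRunLens cur (n + 1) ys else n :: pvRunLens y 1 ys

def pvGroupLens : List Int → List Nat
  | [] => []
  | x :: xs => pvRunLens x 1 xs

def is_valid_region_map_py_alt (region_map : List (List Int)) (size : Int) : Bool :=
  if ((region_map.length : Int) != size) || region_map.any (fun row => (row.length : Int) != size) then
    false
  else
    let cells := PySem.List.sorted (region_map.flatMap (fun row => row)) (fun x => x) false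
    let groupLens := pvGroupLens cells
    ((groupLens.length : Int) == size) && groupLens.all (fun n => (n : Int) == size)

-- ===== PRECONDITION & SPEC =====
def Spec_is_valid_region_map_py (region_map : List (List Int)) (size : Int) (out : Bool) : Prop := out = is_valid_region_map_py_alt region_map size
instance (region_map : List (List Int)) (size : Int) (out : Bool) : Decidable (Spec_is_valid_region_map_py region_map size out) := by unfold Spec_is_valid_region_map_py; infer_instance

-- ===== CLAIM (what is proved, stated in full; the proofs are below) =====
def Claim_equal_is_valid_region_map_py : Prop := ∀ (region_map : List (List Int)) (size : Int), Dom_is_valid_region_map_py region_map size → Spec_is_valid_region_map_py region_map size (is_valid_region_map_py region_map size)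

-- ===== LEMMAS AND PROOFS =====

-- a run scan over a sorted tail: current run absorbs all copies of `cur`, then restarts
lemma pvRunLens_eq (cur : Int) (n : Nat) (l : List Int)
    (hall : ∀ y ∈ l, cur ≤ y) (hs : l.Pairwise (· ≤ ·)) :
    pvRunLens cur n l = (n + l.count cur) :: pvGroupLens (l.filter (fun y => y ≠ cur)) := by
  induction l generalizing n with
  | nil => simp [pvRunLens, pvGroupLens]
  | cons y ys ih =>
    rcases List.pairwise_cons.mp hs with ⟨hy, hys⟩
    by_cases h : y = cur
    · subst h
      rw [pvRunLens, if_pos rfl, ih n.succ (fun z hz => hall z (List.mem_cons_of_mem _ hz)) hys,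
        List.count_cons_self, List.filter_cons_of_neg (by simp)]
      congr 1
      omega
    · have hcy : cur < y := lt_of_le_of_ne (hall y (List.mem_cons_self)) (fun e => h e.symm)
      have hmem : cur ∉ y :: ys := by
        intro hm
        rcases List.mem_cons.mp hm with e | hm'
        · exact h e.symm
        · exact absurd (hy cur hm') (not_le.mpr hcy)
      rw [pvRunLens, if_neg h, List.count_eq_zero.mpr hmem,
        List.filter_eq_self.mpr (fun z hz => by
          simp only [ne_eq, decide_eq_true_eq]
          rintro rfl; exact hmem hz)]
      simp [pvGroupLens]

lemma pvPermAll {α : Type} {l1 l2 : List α} (h : l1.Perm l2) (p : α → Bool) :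
    l1.all p = l2.all p := by
  cases h2 : l2.all p with
  | true =>
    rw [List.all_eq_true] at h2 ⊢
    exact fun x hx => h2 x (h.mem_iff.mp hx)
  | false =>
    rw [List.all_eq_false] at h2 ⊢
    rcases h2 with ⟨x, hx, hpx⟩
    exact ⟨x, h.mem_iff.mpr hx, hpx⟩

-- on a sorted list the run lengths are, up to permutation, the multiplicities of the distinct values
lemma pvGroupLens_perm (l : List Int) (hs : l.Pairwise (· ≤ ·)) :
    (pvGroupLens l).Perm ((PySem.List.dedup l).map (fun v => l.count v)) := by
  induction hn : l.length using Nat.strong_induction_on generalizing l with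
  | _ n ih =>
  cases l with
  | nil => simp [pvGroupLens]
  | cons x xs =>
    rcases List.pairwise_cons.mp hs with ⟨hx, hxs⟩
    have hrun := pvRunLens_eq x 1 xs hx hxs
    have hlen : (xs.filter (fun y => y ≠ x)).length < n := by
      have := List.length_filter_le (fun y => y ≠ x) xs
      simp at hn
      omega
    have hperm := ih _ hlen (xs.filter (fun y => y ≠ x)) (hxs.filter _) rfl
    -- counts over the filtered tail agree with counts over the full list
    have hmapeq : ((PySem.List.dedup (xs.filter (fun y => y ≠ x))).map
          (fun v => (xs.filter (fun y => y ≠ x)).count v)) =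
        ((PySem.List.dedup (xs.filter (fun y => y ≠ x))).map (fun v => (x :: xs).count v)) := by
      apply List.map_congr_left
      intro v hv
      have hvne : v ≠ x := by
        have hm := (PySem.List.mem_dedup _ _).mp hv
        simp at hm
        exact hm.2
      rw [List.count_filter (by simp [hvne])]
      simp [List.count_cons]
      exact fun e => hvne e.symm
    have hded : (PySem.List.dedup (x :: xs)).Perm
        (x :: PySem.List.dedup (xs.filter (fun y => y ≠ x))) := by
      apply (List.perm_ext_iff_of_nodup (PySem.List.nodup_dedup _) ?_).mpr
      · intro v
        simp
        by_cases hvx : v = x <;> simp [hvx]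
      · refine List.nodup_cons.mpr ⟨?_, PySem.List.nodup_dedup _⟩
        simp
    have h1 : pvGroupLens (x :: xs) = ((x :: xs).count x) :: pvGroupLens (xs.filter (fun y => y ≠ x)) := by
      rw [List.count_cons_self]
      simp only [pvGroupLens, hrun]
      congr 1
      omega
    rw [h1]
    refine List.Perm.trans (List.Perm.cons _ (hmapeq ▸ hperm)) ?_
    have h2 : (((x :: xs).count x) :: ((PySem.List.dedup (xs.filter (fun y => y ≠ x))).map
        (fun v => (x :: xs).count v)))
        = (x :: PySem.List.dedup (xs.filter (fun y => y ≠ x))).map (fun v => (x :: xs).count v) := by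
      simp
    rw [h2]
    exact (hded.map _).symm

-- ===== VERDICT (by name: the statement is the Claim_ definition above) =====
theorem is_valid_region_map_py_spec : Claim_equal_is_valid_region_map_py := by
  intro region_map size _
  unfold Spec_is_valid_region_map_py is_valid_region_map_py is_valid_region_map_py_alt
  cases hg : (((region_map.length : Int) != size) || region_map.any (fun row => (row.length : Int) != size)) with
  | true => simp
  | false =>
    simp only [Bool.false_eq_true, if_false]
    set flat := region_map.flatten with hflat
    -- A side: the nested dict-building loop is Counter(flat)
    have hA : region_map.foldl
        (fun d row => row.foldl (fun d x => d.insert x (d.getD x 0 + 1)) d)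
        (PySem.Dict.empty : PySem.Dict Int Int) = PySem.Dict.counter flat := by
      rw [← List.foldl_flatten, PySem.Dict.foldl_insert_getD_add_one_eq_counter]
    have hBflat : region_map.flatMap (fun row => row) = flat := by
      simp [hflat, List.flatMap_def]
    rw [hA, hBflat]
    set cells := PySem.List.sorted flat (fun x => x) false with hcells
    have hcp : cells.Perm flat := PySem.List.sorted_perm flat (fun x => x) false
    have hpair : cells.Pairwise (· ≤ ·) := PySem.List.sorted_pairwise flat (fun x => x)
    have hG := pvGroupLens_perm cells hpair
    have hcount : ∀ v : Int, cells.count v = flat.count v := fun v => hcp.count_eq v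
    have hdedp : (PySem.List.dedup cells).Perm (PySem.Set.ofList flat) := by
      apply (List.perm_ext_iff_of_nodup (PySem.List.nodup_dedup _) (PySem.Set.nodup_ofList _)).mpr
      intro v
      rw [PySem.List.mem_dedup, PySem.Set.mem_ofList, hcp.mem_iff]
    have hG2 : (pvGroupLens cells).Perm ((PySem.Set.ofList flat).map (fun v => flat.count v)) := by
      refine hG.trans ?_
      have : (PySem.List.dedup cells).map (fun v => cells.count v)
          = (PySem.List.dedup cells).map (fun v => flat.count v) := by
        apply List.map_congr_left; intro v _; exact hcount v
      rw [this]
      exact hdedp.map _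
    -- lengths
    have hlen : (pvGroupLens cells).length = (PySem.Set.ofList flat).length := by
      rw [hG2.length_eq, List.length_map]
    -- alls
    have hall : (pvGroupLens cells).all (fun n => (n : Int) == size)
        = (PySem.Set.ofList flat).all (fun v => ((flat.count v : Int)) == size) := by
      rw [pvPermAll hG2, List.all_map]
      rfl
    -- A's size and values via counter lemmas
    simp only [PySem.Dict.size, PySem.Dict.values, PySem.Dict.items_counter, List.length_map,
      List.map_map, List.all_map, hlen, hall]
    rfl
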